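-- pv_equiv track=rewrite | github.com/go-tiger/algorithm | 프로그래머스/0/181893. 배열 조각하기/배열 조각하기.py | solution
-- ===== SOURCE A (Python) =====
-- def solution(arr, query):
--     answer = list(arr)
--     for i, q_val in enumerate(query):
--         if i % 2 == 0:
--             answer = answer[:q_val + 1]
--         else:
--             answer = answer[q_val:]
--     return answer
-- ===== SOURCE B (Python) =====
-- def _clamp(length, s):
--     # Python slice-bound normalisation for a window of the given length
--     if s < 0:
--         s += length
--     return max(0, min(length, s))
--
--
-- def solution(arr, query):
--     # Track the surviving window [lo, hi) of arr; one final slice at the end.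
--     lo, hi = 0, len(arr)
--     cut_right = True
--     for q in query:
--         length = hi - lo
--         if cut_right:
--             hi = lo + _clamp(length, q + 1)
--         else:
--             lo = lo + _clamp(length, q)
--         cut_right = not cut_right
--     return arr[lo:hi]
-- ===== Notes on version B (the rewrite author's own statement) =====
-- stated objective: alternative
-- what changed: Instead of materialising a new list on every query (repeated slicing), B only tracks the lo/hi bounds of the surviving window with Python's slice-bound clamping rule and performs a single slice of the original array at the end; it trades A's per-query list copies for index arithmetic.
import Mathlib
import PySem

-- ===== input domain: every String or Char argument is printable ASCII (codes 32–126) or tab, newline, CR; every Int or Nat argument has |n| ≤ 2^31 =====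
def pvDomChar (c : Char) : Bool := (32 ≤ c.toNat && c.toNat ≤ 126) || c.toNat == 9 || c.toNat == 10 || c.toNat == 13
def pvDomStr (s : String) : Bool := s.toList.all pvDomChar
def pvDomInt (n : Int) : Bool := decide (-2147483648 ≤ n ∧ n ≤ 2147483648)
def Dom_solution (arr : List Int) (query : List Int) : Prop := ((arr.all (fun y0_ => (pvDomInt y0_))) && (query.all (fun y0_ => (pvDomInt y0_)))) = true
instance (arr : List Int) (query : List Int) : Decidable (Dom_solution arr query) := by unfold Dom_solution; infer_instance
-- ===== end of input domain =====

-- B replaces A's repeated list slicing with lo/hi window-index tracking and one final slice of the original array (alternative algorithm; not measured faster).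

-- ===== PORT A =====
-- literal port: answer = list(arr); for i, q in enumerate(query): slice by parity of i
def solution (arr : List Int) (query : List Int) : List Int :=
  (PySem.List.enumerate query 0).foldl
    (fun answer iq =>
      if iq.1 % 2 == 0 then PySem.List.slice answer none (some (iq.2 + 1))
      else PySem.List.slice answer (some iq.2) none)
    arr

-- ===== PORT B =====
-- port of Source B's _clamp: Python slice-bound normalisation for a window of the given length
def pyClampB (length : Nat) (s : Int) : Nat :=
  let s' := if s < 0 then s + length else s
  (max 0 (min (length : Int) s')).toNat

-- port of Source B's for-loop: carries (lo, hi, cut_right)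
def solBLoop : List Int → Nat → Nat → Bool → Nat × Nat
  | [], lo, hi, _ => (lo, hi)
  | q :: qs, lo, hi, cutRight =>
    let length := hi - lo
    if cutRight then solBLoop qs lo (lo + pyClampB length (q + 1)) (!cutRight)
    else solBLoop qs (lo + pyClampB length q) hi (!cutRight)

def solution_alt (arr : List Int) (query : List Int) : List Int :=
  let p := solBLoop query 0 arr.length true
  (arr.drop p.1).take (p.2 - p.1)

-- ===== PRECONDITION & SPEC =====
def Spec_solution (arr : List Int) (query : List Int) (out : List Int) : Prop := out = solution_alt arr query
instance (arr : List Int) (query : List Int) (out : List Int) : Decidable (Spec_solution arr query out) := by unfold Spec_solution; infer_instance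

-- ===== CLAIM (what is proved, stated in full; the proofs are below) =====
def Claim_equal_solution : Prop := ∀ (arr : List Int) (query : List Int), Dom_solution arr query → Spec_solution arr query (solution arr query)

-- ===== LEMMAS AND PROOFS =====

theorem pyClampB_eq_clampIdx (n : Nat) (i : Int) : pyClampB n i = PySem.List.clampIdx n i := by
  simp only [pyClampB, PySem.List.clampIdx]
  split_ifs <;> omega

theorem pyClampB_le (n : Nat) (i : Int) : pyClampB n i ≤ n := by
  simp only [pyClampB]
  split_ifs <;> omega

theorem slice_to_eq_take (xs : List Int) (b : Int) :
    PySem.List.slice xs none (some b) = xs.take (pyClampB xs.length b) := by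
  simp [PySem.List.slice, pyClampB_eq_clampIdx]

theorem slice_from_eq_drop (xs : List Int) (a : Int) :
    PySem.List.slice xs (some a) none = xs.drop (pyClampB xs.length a) := by
  rw [PySem.List.slice_some_none, pyClampB_eq_clampIdx]

theorem loop_eq (query : List Int) (s : Int) (arr : List Int) :
    ∀ (lo hi : Nat), lo ≤ hi → hi ≤ arr.length →
    (PySem.List.enumerate query s).foldl
      (fun answer iq =>
        if iq.1 % 2 == 0 then PySem.List.slice answer none (some (iq.2 + 1))
        else PySem.List.slice answer (some iq.2) none)
      ((arr.drop lo).take (hi - lo))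
    = (fun p : Nat × Nat => (arr.drop p.1).take (p.2 - p.1))
        (solBLoop query lo hi (s % 2 == 0)) := by
  induction query generalizing s with
  | nil => intro lo hi _ _; simp [PySem.List.enumerate_nil, solBLoop]
  | cons q qs ih =>
    intro lo hi hlh hlen
    have hlenw : ((arr.drop lo).take (hi - lo)).length = hi - lo := by
      simp; omega
    rw [PySem.List.enumerate_cons]
    simp only [List.foldl_cons]
    by_cases hpar : s % 2 = 0
    · have hpar' : ((s + 1) % 2 == 0) = false := by
        rw [beq_eq_false_iff_ne]; omega
      simp only [hpar, beq_self_eq_true, if_pos, solBLoop]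
      rw [slice_to_eq_take, hlenw, List.take_take,
        Nat.min_eq_left (pyClampB_le _ _)]
      have h1 : pyClampB (hi - lo) (q + 1) = (lo + pyClampB (hi - lo) (q + 1)) - lo := by omega
      have h2 : lo ≤ lo + pyClampB (hi - lo) (q + 1) := by omega
      have h3 : lo + pyClampB (hi - lo) (q + 1) ≤ arr.length := by
        have := pyClampB_le (hi - lo) (q + 1); omega
      rw [h1, ih (s + 1) lo _ h2 h3]
      simp [hpar']
    · have hne : (s % 2 == 0) = false := by simp [hpar]
      have hpar' : ((s + 1) % 2 == 0) = true := by
        simp only [beq_iff_eq]; omega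
      simp only [hne, Bool.false_eq_true, if_false, solBLoop, Bool.not_false]
      rw [slice_from_eq_drop, hlenw, List.drop_take, List.drop_drop]
      have h2 : pyClampB (hi - lo) q + lo ≤ hi := by
        have := pyClampB_le (hi - lo) q; omega
      have h3 : hi ≤ arr.length := hlen
      have h4 : hi - lo - pyClampB (hi - lo) q = hi - (lo + pyClampB (hi - lo) q) := by omega
      rw [h4]
      have := ih (s + 1) (lo + pyClampB (hi - lo) q) hi (by omega) h3
      rw [this]
      simp [hpar']

-- ===== VERDICT (by name: the statement is the Claim_ definition above) =====
theorem solution_spec : Claim_equal_solution := by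
  intro arr query _
  show solution arr query = solution_alt arr query
  unfold solution solution_alt
  have h := loop_eq query 0 arr 0 arr.length (Nat.zero_le _) (le_refl _)
  simpa using h
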